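-- pv_equiv track=rewrite | github.com/mahsanghani/code_abbey | leetcode/25/maxprodtwopal4.py | palsize
-- ===== SOURCE A (Python) =====
-- def palsize(s: str, mask: int) -> int:
--     i, j = 0, len(s) - 1
--     res = 0
--     while i <= j:
--         if (mask & (1 << i)) == 0:
--             i += 1
--         elif (mask & (1 << j)) == 0:
--             j -= 1
--         else:
--             if s[i] != s[j]:
--                 return 0
--             res += 1 if i == j else 2
--             i += 1
--             j -= 1
--     return res
-- ===== SOURCE B (Python) =====
-- def palsize(s: str, mask: int) -> int:
--     chars = [s[i] for i in range(len(s)) if mask & (1 << i)]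
--     return len(chars) if chars == chars[::-1] else 0
-- ===== Notes on version B (the rewrite author's own statement) =====
-- stated objective: simpler
-- what changed: Replaces the interleaved two-pointer scan with mask-skipping by a two-phase decomposition: first build the selected subsequence with a comprehension, then compare it with its reversal and return its length or 0.
import Mathlib
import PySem

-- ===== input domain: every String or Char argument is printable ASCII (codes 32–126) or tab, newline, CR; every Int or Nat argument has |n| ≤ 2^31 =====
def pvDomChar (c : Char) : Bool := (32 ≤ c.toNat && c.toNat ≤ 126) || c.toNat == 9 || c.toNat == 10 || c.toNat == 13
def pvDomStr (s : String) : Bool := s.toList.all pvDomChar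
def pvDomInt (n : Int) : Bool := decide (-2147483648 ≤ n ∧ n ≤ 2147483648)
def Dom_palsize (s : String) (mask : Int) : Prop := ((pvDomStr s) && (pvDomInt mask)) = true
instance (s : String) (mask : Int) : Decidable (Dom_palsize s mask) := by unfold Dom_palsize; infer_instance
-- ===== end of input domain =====

-- B is a simpler two-phase decomposition (build the masked subsequence, then compare it with
-- its reversal); A's value is reproduced exactly on all inputs, so no Pre_ is needed.

-- ===== PORT A =====
-- literal port of A's while loop: i,j pointers, skip unset mask bits, compare s[i]/s[j]
-- (i and j are provably in range whenever s is indexed, so getD never hits its default)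
def palsizeLoop (cs : List Char) (mask : Int) (i j res : Int) : Int :=
  if i ≤ j then
    if PySem.Int.band mask ((1 : Int) <<< i.toNat) = 0 then
      palsizeLoop cs mask (i + 1) j res
    else if PySem.Int.band mask ((1 : Int) <<< j.toNat) = 0 then
      palsizeLoop cs mask i (j - 1) res
    else if cs.getD i.toNat ' ' ≠ cs.getD j.toNat ' ' then 0
    else palsizeLoop cs mask (i + 1) (j - 1) (res + if i = j then 1 else 2)
  else res
termination_by (j + 1 - i).toNat
decreasing_by all_goals omega

def palsize (s : String) (mask : Int) : Int :=
  palsizeLoop s.toList mask 0 ((s.toList.length : Int) - 1) 0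

-- ===== PORT B =====
-- literal port of Source B: chars = [s[i] for i in range(len(s)) if mask & (1 << i)];
-- return len(chars) if chars == chars[::-1] else 0
def palsize_alt (s : String) (mask : Int) : Int :=
  let cs := s.toList
  let chars := ((List.range cs.length).filter
      (fun (i : Nat) => PySem.Int.band mask ((1 : Int) <<< i) != 0)).map (fun i => cs.getD i ' ')
  if chars = chars.reverse then (chars.length : Int) else 0

-- ===== PRECONDITION & SPEC =====
def Spec_palsize (s : String) (mask : Int) (out : Int) : Prop := out = palsize_alt s mask
instance (s : String) (mask : Int) (out : Int) : Decidable (Spec_palsize s mask out) := by unfold Spec_palsize; infer_instance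

-- ===== CLAIM (what is proved, stated in full; the proofs are below) =====
def Claim_equal_palsize : Prop := ∀ (s : String) (mask : Int), Dom_palsize s mask → Spec_palsize s mask (palsize s mask)

-- ===== LEMMAS AND PROOFS =====

-- the subsequence selected by the mask among indices [a, b)
def pick (cs : List Char) (mask : Int) (a b : Nat) : List Char :=
  ((List.range' a (b - a)).filter
      (fun (i : Nat) => PySem.Int.band mask ((1 : Int) <<< i) != 0)).map (fun i => cs.getD i ' ')

lemma pick_empty (cs : List Char) (mask : Int) (a b : Nat) (h : b ≤ a) :
    pick cs mask a b = [] := by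
  unfold pick
  have h0 : b - a = 0 := by omega
  simp [h0]

lemma pick_cons_of_unset (cs : List Char) (mask : Int) (a b : Nat) (hab : a < b)
    (h : PySem.Int.band mask ((1 : Int) <<< a) = 0) :
    pick cs mask a b = pick cs mask (a + 1) b := by
  unfold pick
  have h1 : b - a = (b - (a + 1)) + 1 := by omega
  rw [h1, List.range'_succ]
  simp [h]

lemma pick_cons_of_set (cs : List Char) (mask : Int) (a b : Nat) (hab : a < b)
    (h : PySem.Int.band mask ((1 : Int) <<< a) ≠ 0) :
    pick cs mask a b = cs.getD a ' ' :: pick cs mask (a + 1) b := by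
  unfold pick
  have h1 : b - a = (b - (a + 1)) + 1 := by omega
  rw [h1, List.range'_succ]
  simp [h]

lemma range'_snoc (a n : Nat) : List.range' a (n + 1) = List.range' a n ++ [a + n] := by
  rw [List.range'_1_concat]

lemma pick_snoc_of_unset (cs : List Char) (mask : Int) (a b : Nat) (hab : a < b)
    (h : PySem.Int.band mask ((1 : Int) <<< (b - 1)) = 0) :
    pick cs mask a b = pick cs mask a (b - 1) := by
  unfold pick
  have h1 : b - a = (b - 1 - a) + 1 := by omega
  rw [h1, range'_snoc]
  have h2 : a + (b - 1 - a) = b - 1 := by omega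
  simp [h2, List.filter_append, h]

lemma pick_snoc_of_set (cs : List Char) (mask : Int) (a b : Nat) (hab : a < b)
    (h : PySem.Int.band mask ((1 : Int) <<< (b - 1)) ≠ 0) :
    pick cs mask a b = pick cs mask a (b - 1) ++ [cs.getD (b - 1) ' '] := by
  unfold pick
  have h1 : b - a = (b - 1 - a) + 1 := by omega
  rw [h1, range'_snoc]
  have h2 : a + (b - 1 - a) = b - 1 := by omega
  simp [h2, List.filter_append, h]

-- palindrome check peels matching ends
lemma pal_cons_snoc (c : Char) (t : List Char) :
    (c :: t ++ [c] = (c :: t ++ [c]).reverse) ↔ (t = t.reverse) := by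
  have hrev : (c :: t ++ [c]).reverse = c :: t.reverse ++ [c] := by
    simp
  rw [hrev]
  constructor
  · intro h
    have h2 : t ++ [c] = t.reverse ++ [c] := by
      simpa using h
    exact List.append_cancel_right h2
  · intro h
    rw [← h]

-- the central invariant: the two-pointer loop over [a, b-1] computes
-- "res + length of the picked subsequence if it is a palindrome, else 0"
lemma loop_eq (cs : List Char) (mask : Int) :
    ∀ n a b : Nat, ∀ res : Int, b - a ≤ n →
      palsizeLoop cs mask (a : Int) ((b : Int) - 1) res =
        (if pick cs mask a b = (pick cs mask a b).reverse then
          res + ((pick cs mask a b).length : Int) else 0) := by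
  intro n
  induction n with
  | zero =>
    intro a b res h
    have hba : b ≤ a := by omega
    rw [palsizeLoop]
    have hlt : ¬ ((a : Int) ≤ (b : Int) - 1) := by omega
    simp [hlt, pick_empty cs mask a b hba]
  | succ n ih =>
    intro a b res h
    by_cases hab : a < b
    · rw [palsizeLoop]
      have hle : (a : Int) ≤ (b : Int) - 1 := by omega
      have hta : ((a : Int)).toNat = a := by omega
      have htb : (((b : Int) - 1)).toNat = b - 1 := by omega
      simp only [hle, if_pos, hta, htb]
      by_cases hA : PySem.Int.band mask ((1 : Int) <<< a) = 0
      · -- bit i unset: skip left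
        have e1 : (a : Int) + 1 = ((a + 1 : Nat) : Int) := by push_cast; ring
        rw [if_pos hA, e1, ih (a + 1) b res (by omega),
          pick_cons_of_unset cs mask a b hab hA]
      · rw [if_neg hA]
        by_cases hB : PySem.Int.band mask ((1 : Int) <<< (b - 1)) = 0
        · -- bit j unset: skip right
          have e1 : (b : Int) - 1 - 1 = ((b - 1 : Nat) : Int) - 1 := by omega
          rw [if_pos hB, e1, ih a (b - 1) res (by omega),
            pick_snoc_of_unset cs mask a b hab hB]
        · rw [if_neg hB]
          by_cases hij : a = b - 1
          · -- i = j: middle character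
            have hc : ¬ (cs.getD a ' ' ≠ cs.getD (b - 1) ' ') := by rw [hij]; simp
            have hijI : (a : Int) = (b : Int) - 1 := by omega
            rw [if_neg hc, if_pos hijI]
            have e1 : (a : Int) + 1 = ((a + 1 : Nat) : Int) := by push_cast; ring
            have e2 : (b : Int) - 1 - 1 = ((b - 1 : Nat) : Int) - 1 := by omega
            rw [e1, e2, ih (a + 1) (b - 1) (res + 1) (by omega)]
            have hpe : pick cs mask (a + 1) (b - 1) = [] := pick_empty _ _ _ _ (by omega)
            have hp : pick cs mask a b = [cs.getD a ' '] := by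
              rw [pick_cons_of_set cs mask a b hab hA,
                pick_empty cs mask (a + 1) b (by omega)]
            simp [hpe, hp]
          · -- i < j: both ends selected
            have hp : pick cs mask a b =
                cs.getD a ' ' :: pick cs mask (a + 1) (b - 1) ++ [cs.getD (b - 1) ' '] := by
              rw [pick_cons_of_set cs mask a b hab hA,
                pick_snoc_of_set cs mask (a + 1) b (by omega) hB]
              simp
            by_cases hc : cs.getD a ' ' ≠ cs.getD (b - 1) ' '
            · rw [if_pos hc]
              have hne : ¬ (pick cs mask a b = (pick cs mask a b).reverse) := by
                rw [hp]
                intro hcontra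
                have h3 : cs.getD a ' ' = cs.getD (b - 1) ' ' := by
                  have := congrArg (fun l => l.headI) hcontra
                  simpa using this
                exact hc h3
              rw [if_neg hne]
            · rw [if_neg hc]
              have hc : cs.getD a ' ' = cs.getD (b - 1) ' ' := not_not.mp hc
              have hijI : ¬ ((a : Int) = (b : Int) - 1) := by omega
              rw [if_neg hijI]
              have e1 : (a : Int) + 1 = ((a + 1 : Nat) : Int) := by push_cast; ring
              have e2 : (b : Int) - 1 - 1 = ((b - 1 : Nat) : Int) - 1 := by omega
              rw [e1, e2, ih (a + 1) (b - 1) (res + 2) (by omega)]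
              set t := pick cs mask (a + 1) (b - 1) with ht
              have hp2 : pick cs mask a b = cs.getD a ' ' :: t ++ [cs.getD a ' '] := by
                rw [hp, hc]
              rw [hp2]
              simp only [pal_cons_snoc]
              by_cases hpal : t = t.reverse
              · rw [if_pos hpal, if_pos hpal]
                simp [List.length_append]
                ring
              · rw [if_neg hpal, if_neg hpal]
    · -- empty range
      have hba : b ≤ a := by omega
      rw [palsizeLoop]
      have hlt : ¬ ((a : Int) ≤ (b : Int) - 1) := by omega
      simp [hlt, pick_empty cs mask a b hba]

lemma pick_full (cs : List Char) (mask : Int) :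
    pick cs mask 0 cs.length =
      ((List.range cs.length).filter
        (fun (i : Nat) => PySem.Int.band mask ((1 : Int) <<< i) != 0)).map (fun i => cs.getD i ' ') := by
  unfold pick
  rw [List.range_eq_range']
  simp

-- ===== VERDICT (by name: the statement is the Claim_ definition above) =====
theorem palsize_spec : Claim_equal_palsize := by
  intro s mask _
  unfold Spec_palsize palsize palsize_alt
  have hL := loop_eq s.toList mask s.toList.length 0 s.toList.length 0 (le_refl _)
  rw [pick_full s.toList mask] at hL
  simpa using hL
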